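-- pv_equiv track=rewrite | github.com/dust-tt/dust | front/lib/api/sandbox/image/profile/_edit_file_core.py | desanitize
-- ===== SOURCE A (Python) =====
-- DESANITIZATIONS = {
--     "<fnr>": "<function_results>",
--     "<n>": "<name>",
--     "</n>": "</name>",
--     "<o>": "<output>",
--     "</o>": "</output>",
--     "<e>": "<error>",
--     "</e>": "</error>",
--     "<s>": "<system>",
--     "</s>": "</system>",
--     "<r>": "<result>",
--     "</r>": "</result>",
--     "\n\nH:": "\n\nHuman:",
--     "\n\nA:": "\n\nAssistant:",
-- }
--
-- def desanitize(s):
--     applied = []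
--     result = s
--     for sanitized, original in DESANITIZATIONS.items():
--         if sanitized in result:
--             result = result.replace(sanitized, original)
--             applied.append((sanitized, original))
--     return result, applied
-- ===== SOURCE B (Python) =====
-- DESANITIZATIONS = {
--     "<fnr>": "<function_results>",
--     "<n>": "<name>",
--     "</n>": "</name>",
--     "<o>": "<output>",
--     "</o>": "</output>",
--     "<e>": "<error>",
--     "</e>": "</error>",
--     "<s>": "<system>",
--     "</s>": "</system>",
--     "<r>": "<result>",
--     "</r>": "</result>",
--     "\n\nH:": "\n\nHuman:",
--     "\n\nA:": "\n\nAssistant:",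
-- }
--
-- def desanitize(s):
--     # single left-to-right scan: at each position substitute the (unique) matching
--     # abbreviation, instead of 13 sequential full-string replace passes
--     items = list(DESANITIZATIONS.items())
--     out = []
--     i, n = 0, len(s)
--     while i < n:
--         for k, v in items:
--             if s.startswith(k, i):
--                 out.append(v)
--                 i += len(k)
--                 break
--         else:
--             out.append(s[i])
--             i += 1
--     return "".join(out), [(k, v) for k, v in items if k in s]
-- ===== Notes on version B (the rewrite author's own statement) =====
-- stated objective: alternative
-- what changed: Instead of 13 sequential full-string str.replace passes (each building a new intermediate string), B makes one left-to-right scan of s substituting the unique matching abbreviation at each position, and builds `applied` by a dict-order membership pass over the original s (valid because keys never overlap each other and replacements never create or destroy key occurrences).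
import Mathlib
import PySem

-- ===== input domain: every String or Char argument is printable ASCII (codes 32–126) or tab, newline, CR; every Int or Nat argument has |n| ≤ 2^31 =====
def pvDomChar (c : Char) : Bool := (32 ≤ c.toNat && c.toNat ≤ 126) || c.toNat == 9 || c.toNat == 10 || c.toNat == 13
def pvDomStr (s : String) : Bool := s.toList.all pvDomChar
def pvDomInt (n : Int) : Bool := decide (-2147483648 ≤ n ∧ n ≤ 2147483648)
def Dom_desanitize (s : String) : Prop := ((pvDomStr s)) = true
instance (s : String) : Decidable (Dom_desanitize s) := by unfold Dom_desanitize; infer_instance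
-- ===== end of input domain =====

-- B replaces A's 13 sequential full-string replace passes by ONE left-to-right scan that
-- substitutes the unique matching abbreviation at each position (alternative objective).

-- ===== PORT A =====
-- the DESANITIZATIONS dict, as an insertion-ordered association list
def pvTable : List (String × String) :=
  [("<fnr>", "<function_results>"), ("<n>", "<name>"), ("</n>", "</name>"),
   ("<o>", "<output>"), ("</o>", "</output>"), ("<e>", "<error>"), ("</e>", "</error>"),
   ("<s>", "<system>"), ("</s>", "</system>"), ("<r>", "<result>"), ("</r>", "</result>"),
   ("\n\nH:", "\n\nHuman:"), ("\n\nA:", "\n\nAssistant:")]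

-- A: for each (sanitized, original) in dict order, if present replace and record it
def desanitize (s : String) : String × (List (String × String)) :=
  pvTable.foldl
    (fun st kv =>
      if PySem.Str.isIn kv.1 st.1 then (PySem.Str.replace st.1 kv.1 kv.2, st.2 ++ [kv]) else st)
    (s, [])

-- ===== PORT B =====
-- B-side helper: the table with keys/values as char lists (Python compares str contents)
def pvTableC : List (List Char × List Char) :=
  pvTable.map (fun kv => (kv.1.toList, kv.2.toList))

-- B's while-loop: at each position emit the expansion of the first matching key, else the char
def pvScan (l : List Char) : List Char :=
  match l with
  | [] => []
  | c :: t =>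
    match h : pvTableC.find? (fun kv => kv.1.isPrefixOf (c :: t)) with
    | some kv => kv.2 ++ pvScan (List.drop kv.1.length (c :: t))
    | none => c :: pvScan t
termination_by l.length
decreasing_by
  all_goals first
    | (simp only [List.length_cons]; omega)
    | (have hm : kv ∈ pvTableC := List.mem_of_find?_eq_some h
       have h1 : ∀ p ∈ pvTableC, 1 ≤ p.1.length := by decide
       have := h1 kv hm
       simp only [List.length_drop, List.length_cons]
       omega)

def desanitize_alt (s : String) : String × (List (String × String)) :=
  (String.ofList (pvScan s.toList), pvTable.filter (fun kv => PySem.Str.isIn kv.1 s))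

-- ===== PRECONDITION & SPEC =====
def Spec_desanitize (s : String) (out : String × (List (String × String))) : Prop := out = desanitize_alt s
instance (s : String) (out : String × (List (String × String))) : Decidable (Spec_desanitize s out) := by unfold Spec_desanitize; infer_instance

-- ===== CLAIM (what is proved, stated in full; the proofs are below) =====
def Claim_equal_desanitize : Prop := ∀ (s : String), Dom_desanitize s → Spec_desanitize s (desanitize s)

-- ===== LEMMAS AND PROOFS =====

-- Proof-side segment model: a partially-desanitized string is a list of segments, each
-- either one still-raw character or a protected (already substituted) expansion.
inductive PvSeg
  | prot : List Char → PvSeg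
  | raw : Char → PvSeg

def pvFlat : List PvSeg → List Char
  | [] => []
  | .prot p :: ts => p ++ pvFlat ts
  | .raw c :: ts => c :: pvFlat ts

def pvRawify (l : List Char) : List PvSeg := l.map PvSeg.raw

-- does k match at the head, consuming only raw segments?
def pvMatch : List Char → List PvSeg → Bool
  | [], _ => true
  | _ :: _, [] => false
  | a :: k, .raw c :: ts => a == c && pvMatch k ts
  | _ :: _, .prot _ :: _ => false

-- one Python str.replace pass (key a :: k') on segments
def pvRep (a : Char) (k' : List Char) (v : List Char) : List PvSeg → List PvSeg
  | [] => []
  | .prot p :: ts => .prot p :: pvRep a k' v ts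
  | .raw c :: ts =>
    if pvMatch (a :: k') (.raw c :: ts) then .prot v :: pvRep a k' v (List.drop k'.length ts)
    else .raw c :: pvRep a k' v ts
termination_by ts => ts.length
decreasing_by
  all_goals (simp only [List.length_drop, List.length_cons]; omega)

def pvStep (u : List PvSeg) (kv : List Char × List Char) : List PvSeg :=
  match kv.1 with
  | [] => u
  | a :: k' => pvRep a k' kv.2 u

def pvFoldRep (tbl : List (List Char × List Char)) (ts : List PvSeg) : List PvSeg :=
  tbl.foldl pvStep ts

-- all 13 keys replaced in one scan, on segments
def pvMulti : List PvSeg → List PvSeg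
  | [] => []
  | .prot p :: ts => .prot p :: pvMulti ts
  | .raw c :: ts =>
    match h : pvTableC.find? (fun kv => pvMatch kv.1 (.raw c :: ts)) with
    | some kv => .prot kv.2 :: pvMulti (List.drop kv.1.length (.raw c :: ts))
    | none => .raw c :: pvMulti ts
termination_by ts => ts.length
decreasing_by
  all_goals first
    | (simp only [List.length_cons]; omega)
    | (have hm : kv ∈ pvTableC := List.mem_of_find?_eq_some h
       have h1 : ∀ p ∈ pvTableC, 1 ≤ p.1.length := by decide
       have := h1 kv hm
       simp only [List.length_drop, List.length_cons]
       omega)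

-- clean recursive characterisation of Python str.replace (key a :: k') on chars
def pvRepC (a : Char) (k' : List Char) (v : List Char) : List Char → List Char
  | [] => []
  | c :: t =>
    if (a :: k').isPrefixOf (c :: t) then v ++ pvRepC a k' v (List.drop k'.length t)
    else c :: pvRepC a k' v t
termination_by l => l.length
decreasing_by
  all_goals (simp only [List.length_drop, List.length_cons]; omega)

-- does k occur (raw-only) anywhere in the segment list?
def pvSegIn (k : List Char) : List PvSeg → Bool
  | [] => false
  | x :: ts => pvMatch k (x :: ts) || pvSegIn k ts

def pvProts : List PvSeg → List (List Char)
  | [] => []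
  | .prot p :: ts => p :: pvProts ts
  | .raw _ :: ts => pvProts ts

-- key k can never touch an occurrence of the expansion p
def PvInsul (k p : List Char) : Prop :=
  (∀ j < p.length, ¬ k <+: p.drop j ∧ ¬ p.drop j <+: k) ∧
  (∀ m < k.length, ¬ k.drop m <+: p ∧ ¬ p <+: k.drop m)

-- keys k and k2 can never overlap
def PvAvoid (k k2 : List Char) : Prop := ∀ p < k.length, ¬ k2 <+: k.drop p ∧ ¬ k.drop p <+: k2

def pvKeys : List (List Char) := pvTableC.map Prod.fst
def pvVals : List (List Char) := pvTableC.map Prod.snd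

-- char-level facts about the literal table, checked by the kernel
theorem pvF1 : ∀ kv ∈ pvTableC, kv.1 ≠ [] := by decide
theorem pvF2 : ∀ ki ∈ pvKeys, ∀ kj ∈ pvKeys, ki ≠ kj → PvAvoid ki kj := by simp only [PvAvoid]; decide
theorem pvF3 : ∀ k ∈ pvKeys, ∀ v ∈ pvVals, PvInsul k v := by simp only [PvInsul]; decide
theorem pvFnodup : pvKeys.Nodup := by decide

theorem pvFlat_rawify (l : List Char) : pvFlat (pvRawify l) = l := by
  induction l with
  | nil => rfl
  | cons c t ih => simpa [pvRawify, pvFlat] using ih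

theorem pvMatch_nil (ts : List PvSeg) : pvMatch [] ts = true := by cases ts <;> rfl

theorem pvMatch_rawify_append (k x : List Char) (ts : List PvSeg) :
    pvMatch k (pvRawify x ++ ts) = true ↔
      (k <+: x ∨ (x <+: k ∧ pvMatch (k.drop x.length) ts = true)) := by
  induction x generalizing k with
  | nil =>
    simp only [pvRawify, List.map_nil, List.nil_append, List.prefix_nil, List.nil_prefix,
      true_and]
    constructor
    · exact Or.inr
    · rintro (rfl | h)
      · exact pvMatch_nil ts
      · exact h
  | cons c x ih =>
    cases k with
    | nil => simp [pvMatch_nil, List.nil_prefix]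
    | cons d k =>
      simp only [pvRawify, List.map_cons, List.cons_append, pvMatch, Bool.and_eq_true, beq_iff_eq,
        List.cons_prefix_cons, List.drop_succ_cons]
      rw [show (List.map PvSeg.raw x : List PvSeg) = pvRawify x from rfl, ih k]
      tauto

theorem pvMatch_rawify (k l : List Char) : pvMatch k (pvRawify l) = k.isPrefixOf l := by
  induction k generalizing l with
  | nil => simp [pvMatch_nil, List.isPrefixOf]
  | cons d k ih =>
    cases l with
    | nil => simp [pvRawify, pvMatch, List.isPrefixOf]
    | cons c l =>
      simp only [pvRawify, List.map_cons, pvMatch, List.isPrefixOf]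
      rw [show (List.map PvSeg.raw l : List PvSeg) = pvRawify l from rfl, ih l]

theorem pvMatch_take_drop (k : List Char) (ts : List PvSeg) (h : pvMatch k ts = true) :
    ts = pvRawify k ++ ts.drop k.length := by
  induction k generalizing ts with
  | nil => simp [pvRawify]
  | cons d k ih =>
    cases ts with
    | nil => simp [pvMatch] at h
    | cons x ts =>
      cases x with
      | prot p => simp [pvMatch] at h
      | raw c =>
        simp only [pvMatch, Bool.and_eq_true, beq_iff_eq] at h
        obtain ⟨rfl, h⟩ := h
        simp only [pvRawify, List.map_cons, List.length_cons, List.drop_succ_cons, List.cons_append]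
        exact congrArg _ (ih ts h)

theorem pvMatch_prot (k : List Char) (p : List Char) (ts : List PvSeg) :
    pvMatch k (.prot p :: ts) = true ↔ k = [] := by
  cases k <;> simp [pvMatch]

theorem pv_prefix_append_iff (k a b : List Char) :
    k <+: a ++ b ↔ (k <+: a ∨ (a <+: k ∧ k.drop a.length <+: b)) := by
  induction a generalizing k with
  | nil =>
    simp only [List.nil_append, List.nil_prefix, true_and, List.prefix_nil]
    constructor
    · exact Or.inr
    · rintro (rfl | h)
      · exact List.nil_prefix
      · exact h
  | cons c a ih =>
    cases k with
    | nil => simp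
    | cons d k =>
      simp only [List.cons_append, List.cons_prefix_cons, List.drop_succ_cons, ih k]
      tauto

theorem pvMatch_flat (k : List Char) :
     ∀ (ts : List PvSeg), (∀ p ∈ pvProts ts, ∀ m < k.length, ¬ k.drop m <+: p ∧ ¬ p <+: k.drop m) →
    ∀ (kk : List Char), (∃ m, kk = k.drop m) →
    (pvMatch kk ts = true ↔ kk <+: pvFlat ts) := by
  intro ts
  induction ts with
  | nil =>
    intro _ kk _
    cases kk <;> simp [pvMatch_nil, pvMatch, pvFlat, List.nil_prefix]
  | cons x ts ih =>
    intro hins kk hkk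
    cases x with
    | prot p =>
      cases kk with
      | nil => simp [pvMatch_nil, List.nil_prefix]
      | cons d kk' =>
        obtain ⟨m, hm⟩ := hkk
        have hmlt : m < k.length := by
          by_contra hge
          rw [List.drop_eq_nil_of_le (by omega)] at hm; simp at hm
        have hp : p ∈ pvProts (PvSeg.prot p :: ts) := by simp [pvProts]
        have havoid := hins p hp m hmlt
        simp only [pvMatch, pvFlat, Bool.false_eq_true, false_iff]
        rw [pv_prefix_append_iff]
        rw [← hm] at havoid
        rintro (h | ⟨h1, _⟩)
        · exact havoid.1 h
        · exact havoid.2 h1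
    | raw c =>
      cases kk with
      | nil => simp [pvMatch_nil, List.nil_prefix]
      | cons d kk' =>
        obtain ⟨m, hm⟩ := hkk
        have hkk' : kk' = k.drop (m + 1) := by
          have : List.drop 1 (k.drop m) = List.drop 1 (d :: kk') := by rw [hm]
          simpa [List.drop_drop, Nat.add_comm] using this.symm
        have hins' : ∀ p ∈ pvProts ts, ∀ m' < k.length, ¬ k.drop m' <+: p ∧ ¬ p <+: k.drop m' := by
          intro p hp; exact hins p (by simp [pvProts, hp])
        simp only [pvMatch, pvFlat, Bool.and_eq_true, beq_iff_eq, List.cons_prefix_cons]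
        rw [ih hins' kk' ⟨m + 1, hkk'⟩]

theorem pv_infix_append_of_avoid (k p X : List Char)
    (h1 : ∀ j < p.length, ¬ k <+: p.drop j ∧ ¬ p.drop j <+: k) :
    k <:+: p ++ X ↔ k <:+: X := by
  induction p with
  | nil => simp
  | cons c p ih =>
    rw [List.cons_append, List.infix_cons_iff]
    have hne : ¬ k <+: (c :: p) ++ X := by
      rw [pv_prefix_append_iff]
      rintro (h | ⟨h', _⟩)
      · exact (h1 0 (by simp)).1 (by simpa using h)
      · exact (h1 0 (by simp)).2 (by simpa using h') 
    rw [List.cons_append] at hne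
    simp only [hne, false_or]
    exact ih (fun j hj => by simpa using h1 (j+1) (by simpa using hj))

theorem pv_segIn_flat (k : List Char) (hk : k ≠ []) :
    ∀ (ts : List PvSeg), (∀ p ∈ pvProts ts, PvInsul k p) →
    (k <:+: pvFlat ts ↔ pvSegIn k ts = true) := by
  intro ts
  induction ts with
  | nil =>
    intro _
    simp only [pvFlat, pvSegIn, List.infix_nil, Bool.false_eq_true, iff_false]
    exact hk
  | cons x ts ih =>
    intro hins
    have hins' : ∀ p ∈ pvProts ts, PvInsul k p := by
      intro p hp
      apply hins
      cases x <;> simp [pvProts, hp]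
    cases x with
    | prot p =>
      have hi := hins p (by simp [pvProts])
      simp only [pvFlat, pvSegIn]
      rw [pv_infix_append_of_avoid k p _ hi.1, ih hins']
      cases hks : pvMatch k (PvSeg.prot p :: ts)
      · simp
      · rw [pvMatch_prot] at hks; exact absurd hks hk
    | raw c =>
      simp only [pvFlat, pvSegIn, List.infix_cons_iff, Bool.or_eq_true]
      rw [ih hins']
      constructor
      · rintro (h | h)
        · left
          rw [pvMatch_flat k (PvSeg.raw c :: ts)
            (fun p hp m hm => (hins p (by simpa [pvProts] using hp)).2 m hm) k ⟨0, rfl⟩]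
          exact h
        · right; exact h
      · rintro (h | h)
        · left
          rw [pvMatch_flat k (PvSeg.raw c :: ts)
            (fun p hp m hm => (hins p (by simpa [pvProts] using hp)).2 m hm) k ⟨0, rfl⟩] at h
          exact h
        · right; exact h

theorem pv_go_spec (a : Char) (k' v : List Char) :
    ∀ (fuel : Nat) (l acc : List Char), l.length ≤ fuel →
      PySem.Chars.replace.go (a :: k') v fuel l acc = acc.reverse ++ pvRepC a k' v l := by
  intro fuel
  induction fuel with
  | zero =>
    intro l acc h
    have : l = [] := List.eq_nil_of_length_eq_zero (by omega)
    subst this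
    simp [PySem.Chars.replace.go, pvRepC]
  | succ fuel ih =>
    intro l acc h
    cases l with
    | nil => simp [PySem.Chars.replace.go, pvRepC]
    | cons c t =>
      rw [PySem.Chars.replace.go]
      rw [pvRepC]
      by_cases hp : (a :: k').isPrefixOf (c :: t)
      · simp only [hp, if_true]
        have hlen : k'.length ≤ t.length := by
          have := (List.isPrefixOf_iff_prefix.mp hp).length_le
          simpa using this
        have hdrop : List.drop (a :: k').length (c :: t) = List.drop k'.length t := by
          simp [List.length_cons]
        have ht : t.length ≤ fuel := by simpa using Nat.le_of_succ_le_succ h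
        rw [hdrop, ih (List.drop k'.length t) (v.reverse ++ acc)
          (by simp only [List.length_drop]; omega)]
        simp
      · simp only [hp, if_false]
        rw [ih t (c :: acc) (by simpa using Nat.le_of_succ_le_succ h)]
        simp

theorem pv_replace_eq (a : Char) (k' v l : List Char) :
    PySem.Chars.replace l (a :: k') v = pvRepC a k' v l := by
  rw [PySem.Chars.replace]
  simp only [List.isEmpty_cons, if_false, Bool.false_eq_true]
  simpa using pv_go_spec a k' v l.length l [] le_rfl

theorem pvRepC_skip (a : Char) (k' v : List Char) :
    ∀ (x y : List Char), (∀ j < x.length, ¬ (a :: k') <+: (x ++ y).drop j) →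
    pvRepC a k' v (x ++ y) = x ++ pvRepC a k' v y := by
  intro x
  induction x with
  | nil => simp
  | cons c x ih =>
    intro y h
    rw [List.cons_append, pvRepC]
    have h0 : ¬ (a :: k').isPrefixOf (c :: (x ++ y)) := by
      rw [List.isPrefixOf_iff_prefix]
      simpa using h 0 (by simp)
    simp only [h0, Bool.false_eq_true, if_false]
    rw [ih y (fun j hj => by simpa using h (j + 1) (by simpa using hj))]
    simp

theorem pvProts_drop (n : Nat) :
    ∀ (ts : List PvSeg) (p : List Char), p ∈ pvProts (List.drop n ts) → p ∈ pvProts ts := by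
  induction n with
  | zero => simp
  | succ n ih =>
    intro ts p hp
    cases ts with
    | nil => simpa using hp
    | cons x ts =>
      rw [List.drop_succ_cons] at hp
      cases x with
      | prot q => simp only [pvProts, List.mem_cons]; right; exact ih ts p hp
      | raw c => exact ih ts p hp

theorem pvProts_pvRep (a : Char) (k' v : List Char) :
    ∀ ts, ∀ p ∈ pvProts (pvRep a k' v ts), p = v ∨ p ∈ pvProts ts := by
  intro ts
  induction hn : ts.length using Nat.strong_induction_on generalizing ts with
  | _ n ih =>
  cases ts with
  | nil => subst hn; intro p hp; rw [pvRep] at hp; simp [pvProts] at hp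
  | cons x ts =>
    subst hn
    cases x with
    | prot q =>
      rw [pvRep]
      intro p hp
      simp only [pvProts, List.mem_cons] at hp
      rcases hp with rfl | hp
      · right; simp [pvProts]
      · rcases ih ts.length (by simp) ts rfl p hp with h | h
        · left; exact h
        · right; simp [pvProts, h]
    | raw c =>
      rw [pvRep]
      by_cases hm : pvMatch (a :: k') (PvSeg.raw c :: ts)
      · simp only [hm, if_true]
        intro p hp
        simp only [pvProts, List.mem_cons] at hp
        rcases hp with rfl | hp
        · left; rfl
        · rcases ih (List.drop k'.length ts).length (by simp only [List.length_drop, List.length_cons]; omega)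
            (List.drop k'.length ts) rfl p hp with h | h
          · left; exact h
          · right
            exact pvProts_drop k'.length ts p h
      · simp only [hm, Bool.false_eq_true, if_false]
        intro p hp
        rw [show pvProts (PvSeg.raw c :: pvRep a k' v ts) = pvProts (pvRep a k' v ts) from rfl] at hp
        rcases ih ts.length (by simp) ts rfl p hp with h | h
        · left; exact h
        · right; exact h

theorem pvRep_raw_pos (a c : Char) (k' v : List Char) (ts : List PvSeg)
    (hm : pvMatch (a :: k') (.raw c :: ts) = true) :
    pvRep a k' v (.raw c :: ts) = .prot v :: pvRep a k' v (List.drop k'.length ts) := by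
  rw [pvRep]; simp [hm]

theorem pvRep_raw_neg (a c : Char) (k' v : List Char) (ts : List PvSeg)
    (hm : pvMatch (a :: k') (.raw c :: ts) = false) :
    pvRep a k' v (.raw c :: ts) = .raw c :: pvRep a k' v ts := by
  rw [pvRep]; simp [hm]

theorem pvRep_split (a : Char) (k' v : List Char) :
    ∀ (n : Nat) (ts : List PvSeg), (∀ j < n, pvMatch (a :: k') (ts.drop j) = false) →
      pvRep a k' v ts = ts.take n ++ pvRep a k' v (ts.drop n) := by
  intro n
  induction n with
  | zero => simp
  | succ n ih =>
    intro ts h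
    cases ts with
    | nil => simp [pvRep]
    | cons x ts =>
      simp only [List.take_succ_cons, List.drop_succ_cons, List.cons_append]
      cases x with
      | prot p =>
        rw [pvRep]
        rw [ih ts (fun j hj => by simpa using h (j + 1) (by omega))]
      | raw c =>
        rw [pvRep_raw_neg a c k' v ts (by simpa using h 0 (by omega))]
        rw [ih ts (fun j hj => by simpa using h (j + 1) (by omega))]

theorem pvRep_nil (a : Char) (k' v : List Char) : pvRep a k' v [] = [] := by rw [pvRep]

theorem pvSegIn_false_all (k : List Char) (hk : k ≠ []) :
    ∀ ts, pvSegIn k ts = false → ∀ p, pvMatch k (ts.drop p) = false := by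
  intro ts
  induction ts with
  | nil =>
    intro h p
    simp only [List.drop_nil]
    cases k with
    | nil => exact absurd rfl hk
    | cons a k => rfl
  | cons x ts ih =>
    intro h p
    rw [pvSegIn, Bool.or_eq_false_iff] at h
    cases p with
    | zero => exact h.1
    | succ p => rw [List.drop_succ_cons]; exact ih h.2 p
  
theorem pvRep_noop_seg (a : Char) (k' v : List Char) (ts : List PvSeg)
    (h : pvSegIn (a :: k') ts = false) : pvRep a k' v ts = ts := by
  have := pvRep_split a k' v ts.length ts
    (fun j hj => pvSegIn_false_all _ (by simp) ts h j)
  simpa [pvRep_nil] using this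

theorem pvRep_rawify_head (a : Char) (k' v : List Char) (x : List Char) (rest : List PvSeg)
    (h : ∀ j < x.length, ¬ (a :: k') <+: x.drop j ∧ ¬ x.drop j <+: (a :: k')) :
    pvRep a k' v (pvRawify x ++ rest) = pvRawify x ++ pvRep a k' v rest := by
  have hsplit := pvRep_split a k' v x.length (pvRawify x ++ rest) ?_
  · rw [hsplit]
    have hlen : (pvRawify x).length = x.length := by simp [pvRawify]
    rw [List.take_append_of_le_length (by omega), List.drop_append_of_le_length (by omega)]
    rw [← hlen, List.take_length, List.drop_length]
    simp
  · intro j hj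
    have hdrop : List.drop j (pvRawify x ++ rest) = pvRawify (x.drop j) ++ rest := by
      rw [List.drop_append_of_le_length (by simp [pvRawify]; omega)]
      simp [pvRawify, List.map_drop]
    rw [hdrop]
    cases hmm : pvMatch (a :: k') (pvRawify (List.drop j x) ++ rest)
    · rfl
    · rw [pvMatch_rawify_append] at hmm
      rcases hmm with hp | ⟨hp, _⟩
      · exact absurd hp (h j hj).1
      · exact absurd hp (h j hj).2

theorem pvMatch_pvRep_imp (a : Char) (k' v : List Char) :
    ∀ ts kk, pvMatch kk (pvRep a k' v ts) = true → pvMatch kk ts = true := by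
  intro ts
  induction hn : ts.length using Nat.strong_induction_on generalizing ts with
  | _ n ih =>
  cases ts with
  | nil => intro kk h; rw [pvRep] at h; exact h
  | cons x ts =>
    subst hn
    intro kk h
    cases x with
    | prot p =>
      rw [pvRep] at h
      cases kk with
      | nil => exact pvMatch_nil _
      | cons d kk => simp [pvMatch] at h
    | raw c =>
      by_cases hm : pvMatch (a :: k') (PvSeg.raw c :: ts)
      · rw [pvRep_raw_pos a c k' v ts hm] at h
        cases kk with
        | nil => exact pvMatch_nil _
        | cons d kk => simp [pvMatch] at h
      · rw [pvRep_raw_neg a c k' v ts (by simpa using hm)] at h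
        cases kk with
        | nil => exact pvMatch_nil _
        | cons d kk =>
          rw [pvMatch, Bool.and_eq_true] at h ⊢
          exact ⟨h.1, ih ts.length (by simp) ts rfl kk h.2⟩

theorem pvSegIn_drop_imp (kk : List Char) :
    ∀ (n : Nat) (ts : List PvSeg), pvSegIn kk (ts.drop n) = true → pvSegIn kk ts = true := by
  intro n
  induction n with
  | zero => simp
  | succ n ih =>
    intro ts h
    cases ts with
    | nil => simpa using h
    | cons x ts =>
      rw [List.drop_succ_cons] at h
      rw [pvSegIn, Bool.or_eq_true]
      right; exact ih ts h

theorem pvSegIn_drop_of_nomatch (kk : List Char) :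
    ∀ (n : Nat) (ts : List PvSeg), pvSegIn kk ts = true →
      (∀ p < n, pvMatch kk (ts.drop p) = false) → pvSegIn kk (ts.drop n) = true := by
  intro n
  induction n with
  | zero => simp
  | succ n ih =>
    intro ts h hp
    cases ts with
    | nil => simpa using h
    | cons x ts =>
      rw [List.drop_succ_cons]
      rw [pvSegIn, Bool.or_eq_true] at h
      rcases h with h | h
      · have h0 := hp 0 (by omega)
        rw [List.drop_zero] at h0
        simp [h] at h0
      · exact ih ts h (fun p hpn => by simpa using hp (p + 1) (by omega))

theorem pvSegIn_prot (kk : List Char) (hkk : kk ≠ []) (p : List Char) (ts : List PvSeg) :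
    pvSegIn kk (.prot p :: ts) = pvSegIn kk ts := by
  rw [pvSegIn]
  cases kk with
  | nil => exact absurd rfl hkk
  | cons d kk => simp [pvMatch]

theorem pv_region_nomatch (K kk : List Char) (ts : List PvSeg) (p : Nat)
    (h : pvMatch K ts = true) (hp : p ≤ K.length)
    (hnp1 : ¬ kk <+: K.drop p) (hnp2 : ¬ K.drop p <+: kk) :
    pvMatch kk (ts.drop p) = false := by
  have hts := pvMatch_take_drop K ts h
  have hdrop : ts.drop p = pvRawify (K.drop p) ++ ts.drop K.length := by
    conv_lhs => rw [hts]
    rw [List.drop_append_of_le_length (by simp [pvRawify]; omega)]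
    simp [pvRawify, List.map_drop]
  rw [hdrop]
  cases hmm : pvMatch kk (pvRawify (K.drop p) ++ ts.drop K.length)
  · rfl
  · rw [pvMatch_rawify_append] at hmm
    rcases hmm with hh | ⟨hh, _⟩
    · exact absurd hh hnp1
    · exact absurd hh hnp2

theorem pvSegIn_pvRep_eq (a : Char) (k' : List Char) (v kk : List Char) (hkk : kk ≠ [])
    (h12 : PvAvoid (a :: k') kk) (h21 : PvAvoid kk (a :: k')) :
    ∀ ts, pvSegIn kk (pvRep a k' v ts) = pvSegIn kk ts := by
  intro ts
  induction hn : ts.length using Nat.strong_induction_on generalizing ts with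
  | _ n ih =>
  cases ts with
  | nil => rw [pvRep_nil]
  | cons x ts =>
    subst hn
    cases x with
    | prot p =>
      rw [pvRep, pvSegIn_prot kk hkk, pvSegIn_prot kk hkk]
      exact ih ts.length (by simp) ts rfl
    | raw c =>
      by_cases hm : pvMatch (a :: k') (PvSeg.raw c :: ts)
      · -- the replaced key matches right here; kk cannot match in positions < (a::k').length
        rw [pvRep_raw_pos a c k' v ts hm, pvSegIn_prot kk hkk]
        have hnom : ∀ p < (a :: k').length, pvMatch kk ((PvSeg.raw c :: ts).drop p) = false := by
          intro p hp
          exact pv_region_nomatch (a :: k') kk (PvSeg.raw c :: ts) p hm (by omega)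
            (h12 p hp).1 (h12 p hp).2
        have hdrop : (PvSeg.raw c :: ts).drop (a :: k').length = ts.drop k'.length := by
          simp
        have hih := ih (List.drop k'.length ts).length
          (by simp only [List.length_drop, List.length_cons]; omega)
          (List.drop k'.length ts) rfl
        rw [hih]
        cases hrhs : pvSegIn kk (PvSeg.raw c :: ts)
        · cases hl : pvSegIn kk (List.drop k'.length ts)
          · rfl
          · have := pvSegIn_drop_imp kk k'.length ts hl
            have : pvSegIn kk (PvSeg.raw c :: ts) = true := by
              rw [pvSegIn, Bool.or_eq_true]; right; exact this
            rw [hrhs] at this; simp at this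
        · have := pvSegIn_drop_of_nomatch kk (a :: k').length (PvSeg.raw c :: ts) hrhs hnom
          rw [hdrop] at this
          rw [this]
      · rw [pvRep_raw_neg a c k' v ts (by simpa using hm)]
        rw [pvSegIn, pvSegIn]
        have hih := ih ts.length (by simp) ts rfl
        rw [hih]
        have hmeq : pvMatch kk (PvSeg.raw c :: pvRep a k' v ts) = pvMatch kk (PvSeg.raw c :: ts) := by
          cases hr : pvMatch kk (PvSeg.raw c :: ts)
          · cases hl : pvMatch kk (PvSeg.raw c :: pvRep a k' v ts)
            · rfl
            · have : pvMatch kk (pvRep a k' v (PvSeg.raw c :: ts)) = true := by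
                rw [pvRep_raw_neg a c k' v ts (by simpa using hm)]; exact hl
              have := pvMatch_pvRep_imp a k' v _ kk this
              rw [hr] at this; simp at this
          · -- kk matches at the head; (a::k') matches at no position < kk.length, so the
            -- matched raw region survives pvRep
            have hnomK : ∀ p < kk.length, pvMatch (a :: k') ((PvSeg.raw c :: ts).drop p) = false := by
              intro p hp
              cases p with
              | zero => simpa using hm
              | succ p =>
                exact pv_region_nomatch kk (a :: k') (PvSeg.raw c :: ts) (p + 1) hr (by omega)
                  (h21 (p + 1) hp).1 (h21 (p + 1) hp).2
            have hsplit := pvRep_split a k' v kk.length (PvSeg.raw c :: ts) hnomK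
            have hts := pvMatch_take_drop kk (PvSeg.raw c :: ts) hr
            have htake : (PvSeg.raw c :: ts).take kk.length = pvRawify kk := by
              conv_lhs => rw [hts]
              rw [List.take_append_of_le_length (by simp [pvRawify])]
              rw [show kk.length = (pvRawify kk).length by simp [pvRawify], List.take_length]
            rw [htake] at hsplit
            have : pvMatch kk (pvRep a k' v (PvSeg.raw c :: ts)) = true := by
              rw [hsplit, pvMatch_rawify_append]
              left; exact List.prefix_refl kk
            rw [pvRep_raw_neg a c k' v ts (by simpa using hm)] at this
            exact this
        rw [hmeq]

theorem pvRep_prot_cons (a : Char) (k' v p : List Char) (ts : List PvSeg) :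
    pvRep a k' v (.prot p :: ts) = .prot p :: pvRep a k' v ts := by
  rw [pvRep]

theorem pvFoldRep_nil_ts (tbl : List (List Char × List Char)) : pvFoldRep tbl [] = [] := by
  induction tbl with
  | nil => rfl
  | cons kv tbl ih =>
    rw [pvFoldRep, List.foldl_cons]
    have : pvStep [] kv = [] := by
      rw [pvStep]
      cases hv : kv.1 with
      | nil => rfl
      | cons a k' => exact pvRep_nil a k' kv.2
    rw [this]
    exact ih

theorem pvFoldRep_prot (tbl : List (List Char × List Char)) (p : List Char) :
    ∀ (ts : List PvSeg), pvFoldRep tbl (.prot p :: ts) = .prot p :: pvFoldRep tbl ts := by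
  induction tbl with
  | nil => intro ts; rfl
  | cons kv tbl ih =>
    intro ts
    rw [pvFoldRep, List.foldl_cons]
    have hstep : pvStep (.prot p :: ts) kv = .prot p :: pvStep ts kv := by
      rw [pvStep, pvStep]
      cases hv : kv.1 with
      | nil => rfl
      | cons a k' => exact pvRep_prot_cons a k' kv.2 p ts
    rw [hstep]
    exact ih (pvStep ts kv)

theorem pvFoldRep_nohead (c : Char) :
    ∀ (tbl : List (List Char × List Char)) (ts : List PvSeg),
      (∀ kv ∈ tbl, pvMatch kv.1 (.raw c :: ts) = false) →
      pvFoldRep tbl (.raw c :: ts) = .raw c :: pvFoldRep tbl ts := by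
  intro tbl
  induction tbl with
  | nil => intro ts _; rfl
  | cons kv tbl ih =>
    intro ts h
    rw [pvFoldRep, List.foldl_cons]
    have hm := h kv (by simp)
    have hstep : pvStep (.raw c :: ts) kv = .raw c :: pvStep ts kv := by
      rw [pvStep, pvStep]
      cases hv : kv.1 with
      | nil => rfl
      | cons a k' =>
        rw [hv] at hm
        exact pvRep_raw_neg a c k' kv.2 ts hm
    rw [hstep]
    have hrest : ∀ kv' ∈ tbl, pvMatch kv'.1 (.raw c :: pvStep ts kv) = false := by
      intro kv' hkv'
      cases hl : pvMatch kv'.1 (.raw c :: pvStep ts kv)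
      · rfl
      · exfalso
        have himp : pvMatch kv'.1 (PvSeg.raw c :: ts) = true := by
          rw [pvStep] at hl
          cases hv : kv.1 with
          | nil => rw [hv] at hl; exact hl
          | cons a k' =>
            rw [hv] at hl
            have : pvMatch kv'.1 (pvRep a k' kv.2 (PvSeg.raw c :: ts)) = true := by
              rw [pvRep_raw_neg a c k' kv.2 ts (by rw [hv] at hm; exact hm)]
              exact hl
            exact pvMatch_pvRep_imp a k' kv.2 _ kv'.1 this
        rw [h kv' (by simp [hkv'])] at himp
        simp at himp
    exact ih (pvStep ts kv) hrest

theorem pvFoldRep_region (x : List Char) :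
    ∀ (tbl : List (List Char × List Char)) (rest : List PvSeg),
      (∀ kv ∈ tbl, ∀ j < x.length, ¬ kv.1 <+: x.drop j ∧ ¬ x.drop j <+: kv.1) →
      pvFoldRep tbl (pvRawify x ++ rest) = pvRawify x ++ pvFoldRep tbl rest := by
  intro tbl
  induction tbl with
  | nil => intro rest _; rfl
  | cons kv tbl ih =>
    intro rest h
    rw [pvFoldRep, List.foldl_cons]
    have hstep : pvStep (pvRawify x ++ rest) kv = pvRawify x ++ pvStep rest kv := by
      rw [pvStep, pvStep]
      cases hv : kv.1 with
      | nil => rfl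
      | cons a k' =>
        apply pvRep_rawify_head
        intro j hj
        have := h kv (by simp) j hj
        rw [hv] at this
        exact this
    rw [hstep]
    exact ih (pvStep rest kv) (fun kv' hkv' => h kv' (by simp [hkv']))

theorem pvMulti_nil : pvMulti [] = [] := by rw [pvMulti]

theorem pvMulti_prot (p : List Char) (ts : List PvSeg) :
    pvMulti (.prot p :: ts) = .prot p :: pvMulti ts := by rw [pvMulti]

theorem pvMulti_raw_some (c : Char) (ts : List PvSeg) (kv : List Char × List Char)
    (h : pvTableC.find? (fun kv => pvMatch kv.1 (.raw c :: ts)) = some kv) :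
    pvMulti (.raw c :: ts) = .prot kv.2 :: pvMulti (List.drop kv.1.length (.raw c :: ts)) := by
  rw [pvMulti]
  split
  · rename_i kv' h'
    rw [h] at h'
    cases h'
    rfl
  · rename_i h'
    rw [h] at h'
    cases h'

theorem pvMulti_raw_none (c : Char) (ts : List PvSeg)
    (h : pvTableC.find? (fun kv => pvMatch kv.1 (.raw c :: ts)) = none) :
    pvMulti (.raw c :: ts) = .raw c :: pvMulti ts := by
  rw [pvMulti]
  split
  · rename_i kv' h'
    rw [h] at h'
    cases h'
  · rfl

theorem pvFoldRep_eq_pvMulti : ∀ ts, pvFoldRep pvTableC ts = pvMulti ts := by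
  intro ts
  induction hn : ts.length using Nat.strong_induction_on generalizing ts with
  | _ n ih =>
  cases ts with
  | nil => rw [pvMulti_nil]; exact pvFoldRep_nil_ts pvTableC
  | cons x ts =>
    subst hn
    cases x with
    | prot p =>
      rw [pvMulti_prot, pvFoldRep_prot]
      rw [ih ts.length (by simp) ts rfl]
    | raw c =>
      cases hfind : pvTableC.find? (fun kv => pvMatch kv.1 (.raw c :: ts)) with
      | none =>
        rw [pvMulti_raw_none c ts hfind]
        rw [pvFoldRep_nohead c pvTableC ts (by
          intro kv hkv
          have := List.find?_eq_none.mp hfind kv hkv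
          simpa using this)]
        rw [ih ts.length (by simp) ts rfl]
      | some kv =>
        obtain ⟨hpred, as, bs, htbl, hpre⟩ := List.find?_eq_some_iff_append.mp hfind
        replace hpred : pvMatch kv.1 (PvSeg.raw c :: ts) = true := by simpa using hpred
        have hkvmem : kv ∈ pvTableC := by rw [htbl]; simp
        have hkne : kv.1 ≠ [] := pvF1 kv hkvmem
        obtain ⟨a0, k0, hk0⟩ : ∃ a0 k0, kv.1 = a0 :: k0 := by
          cases hkv1 : kv.1 with
          | nil => exact absurd hkv1 hkne
          | cons a0 k0 => exact ⟨a0, k0, rfl⟩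
        set ts0 := PvSeg.raw c :: ts with hts0
        have hts0len : kv.1.length ≤ ts0.length := by
          have := pvMatch_take_drop kv.1 ts0 hpred
          have hlen := congrArg List.length this
          simp only [List.length_append, pvRawify, List.length_map, List.length_drop] at hlen
          omega
        set R := ts0.drop kv.1.length with hR
        have htsplit : ts0 = pvRawify kv.1 ++ R := pvMatch_take_drop kv.1 ts0 hpred
        -- no earlier key matches anywhere inside the kv.1 region
        have hregion : ∀ kv' ∈ as, ∀ j < kv.1.length, ¬ kv'.1 <+: kv.1.drop j ∧ ¬ kv.1.drop j <+: kv'.1 := by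
          intro kv' hkv' j hj
          have hkv'mem : kv' ∈ pvTableC := by rw [htbl]; exact List.mem_append_left _ hkv'
          have hne : kv'.1 ≠ kv.1 := by
            intro heq
            have := hpre kv' hkv'
            simp only [Bool.not_eq_eq_eq_not, Bool.not_true] at this
            rw [heq] at this
            simp only [hpred] at this
            exact absurd this (by simp)
          have hav := pvF2 kv.1 (by rw [pvKeys]; exact List.mem_map_of_mem hkvmem)
            kv'.1 (by rw [pvKeys]; exact List.mem_map_of_mem hkv'mem)
            (fun heq => hne heq.symm)
          exact hav j hj
        -- fold over the earlier keys skips the region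
        have hfold_as : pvFoldRep as ts0 = pvRawify kv.1 ++ pvFoldRep as R := by
          rw [htsplit]
          exact pvFoldRep_region kv.1 as R hregion
        -- the kv step replaces the region
        have hstep : pvStep (pvRawify kv.1 ++ pvFoldRep as R) kv
            = .prot kv.2 :: pvStep (pvFoldRep as R) kv := by
          rw [pvStep, pvStep, hk0]
          show pvRep a0 k0 kv.2 (pvRawify (a0 :: k0) ++ pvFoldRep as R)
              = PvSeg.prot kv.2 :: pvRep a0 k0 kv.2 (pvFoldRep as R)
          have hmm : pvMatch (a0 :: k0) (PvSeg.raw a0 :: (pvRawify k0 ++ pvFoldRep as R)) = true := by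
            have : (PvSeg.raw a0 :: (pvRawify k0 ++ pvFoldRep as R))
                = pvRawify (a0 :: k0) ++ pvFoldRep as R := by simp [pvRawify]
            rw [this, pvMatch_rawify_append]
            left; exact List.prefix_refl _
          rw [show pvRawify (a0 :: k0) ++ pvFoldRep as R
              = PvSeg.raw a0 :: (pvRawify k0 ++ pvFoldRep as R) by simp [pvRawify],
            pvRep_raw_pos a0 a0 k0 kv.2 _ hmm]
          congr 1
          rw [List.drop_append_of_le_length (by simp [pvRawify])]
          rw [show k0.length = (pvRawify k0).length by simp [pvRawify], List.drop_length]
          simp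
        -- assemble the fold over the whole table
        have hassemble : pvFoldRep pvTableC ts0 = .prot kv.2 :: pvFoldRep pvTableC R := by
          rw [htbl]
          rw [pvFoldRep, List.foldl_append, List.foldl_cons]
          rw [show List.foldl pvStep ts0 as = pvFoldRep as ts0 from rfl]
          rw [hfold_as, hstep]
          rw [show List.foldl pvStep (PvSeg.prot kv.2 :: pvStep (pvFoldRep as R) kv) bs
              = pvFoldRep bs (PvSeg.prot kv.2 :: pvStep (pvFoldRep as R) kv) from rfl]
          rw [pvFoldRep_prot]
          congr 1
          conv_rhs => rw [pvFoldRep, List.foldl_append, List.foldl_cons]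
          rfl
        rw [hassemble, pvMulti_raw_some c ts kv hfind]
        congr 1
        have hRlen : R.length < ts0.length := by
          rw [hR]
          simp only [List.length_drop]
          have hb : 0 < kv.1.length := by rw [hk0]; simp
          have ha : 0 < ts0.length := by rw [hts0]; simp
          omega
        exact ih R.length (by simpa using hRlen) R rfl

theorem pvScan_cons_some (c : Char) (t : List Char) (kv : List Char × List Char)
    (h : pvTableC.find? (fun kv => kv.1.isPrefixOf (c :: t)) = some kv) :
    pvScan (c :: t) = kv.2 ++ pvScan (List.drop kv.1.length (c :: t)) := by
  rw [pvScan]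
  split
  · rename_i kv' h'
    rw [h] at h'; cases h'; rfl
  · rename_i h'
    rw [h] at h'; cases h'

theorem pvScan_cons_none (c : Char) (t : List Char)
    (h : pvTableC.find? (fun kv => kv.1.isPrefixOf (c :: t)) = none) :
    pvScan (c :: t) = c :: pvScan t := by
  rw [pvScan]
  split
  · rename_i kv' h'
    rw [h] at h'; cases h'
  · rfl

theorem pv_find?_congr {α : Type} (p q : α → Bool) :
    ∀ (l : List α), (∀ x ∈ l, p x = q x) → l.find? p = l.find? q := by
  intro l
  induction l with
  | nil => intro _; rfl
  | cons x l ih =>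
    intro h
    rw [List.find?_cons, List.find?_cons, h x (by simp)]
    cases q x
    · exact ih (fun y hy => h y (by simp [hy]))
    · rfl

theorem pvScan_eq_multi : ∀ l, pvScan l = pvFlat (pvMulti (pvRawify l)) := by
  intro l
  induction hn : l.length using Nat.strong_induction_on generalizing l with
  | _ n ih =>
  cases l with
  | nil => rw [pvScan, pvRawify, List.map_nil, pvMulti_nil]; rfl
  | cons c t =>
    subst hn
    have hraw : pvRawify (c :: t) = PvSeg.raw c :: pvRawify t := by simp [pvRawify]
    have hcong : pvTableC.find? (fun kv => pvMatch kv.1 (PvSeg.raw c :: pvRawify t))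
        = pvTableC.find? (fun kv => kv.1.isPrefixOf (c :: t)) := by
      apply pv_find?_congr
      intro kv _
      rw [show (PvSeg.raw c :: pvRawify t) = pvRawify (c :: t) by simp [pvRawify]]
      exact pvMatch_rawify kv.1 (c :: t)
    cases hfind : pvTableC.find? (fun kv => kv.1.isPrefixOf (c :: t)) with
    | none =>
      rw [pvScan_cons_none c t hfind, hraw, pvMulti_raw_none c (pvRawify t) (by rw [hcong]; exact hfind)]
      rw [pvFlat]
      rw [ih t.length (by simp) t rfl]
    | some kv =>
      have hmem : kv ∈ pvTableC := List.mem_of_find?_eq_some hfind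
      have hklen : 1 ≤ kv.1.length := by
        have := pvF1 kv hmem
        cases hk : kv.1 with
        | nil => exact absurd hk this
        | cons a k0 => simp
      rw [pvScan_cons_some c t kv hfind, hraw,
        pvMulti_raw_some c (pvRawify t) kv (by rw [hcong]; exact hfind)]
      rw [pvFlat]
      congr 1
      rw [show (PvSeg.raw c :: pvRawify t) = pvRawify (c :: t) by simp [pvRawify]]
      rw [show List.drop kv.1.length (pvRawify (c :: t)) = pvRawify (List.drop kv.1.length (c :: t)) by
        simp [pvRawify, List.map_drop]]
      rw [ih (List.drop kv.1.length (c :: t)).length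
        (by simp only [List.length_drop, List.length_cons]; omega)
        (List.drop kv.1.length (c :: t)) rfl]

theorem pvFlat_rawify_append (u : List Char) :
    ∀ (w : List PvSeg), pvFlat (pvRawify u ++ w) = u ++ pvFlat w := by
  induction u with
  | nil => intro w; rfl
  | cons d u ihu =>
    intro w
    rw [show pvRawify (d :: u) = PvSeg.raw d :: pvRawify u by simp [pvRawify], List.cons_append,
      pvFlat, ihu w]
    rfl

theorem pvFlat_pvRep (a : Char) (k' v : List Char) :
    ∀ ts, (∀ p ∈ pvProts ts, PvInsul (a :: k') p) →
      pvFlat (pvRep a k' v ts) = pvRepC a k' v (pvFlat ts) := by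
  intro ts
  induction hn : ts.length using Nat.strong_induction_on generalizing ts with
  | _ n ih =>
  cases ts with
  | nil => intro _; rw [pvRep_nil]; rw [pvFlat]; rw [pvRepC]
  | cons x ts =>
    subst hn
    intro hins
    have hins' : ∀ p ∈ pvProts ts, PvInsul (a :: k') p := by
      intro p hp; apply hins; cases x <;> simp [pvProts, hp]
    cases x with
    | prot p =>
      rw [pvRep_prot_cons, pvFlat, pvFlat]
      have hi := hins p (by simp [pvProts])
      rw [pvRepC_skip a k' v p (pvFlat ts) (by
        intro j hj
        rw [List.drop_append_of_le_length (by omega)]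
        intro hpre
        rw [pv_prefix_append_iff] at hpre
        rcases hpre with h | ⟨h, _⟩
        · exact (hi.1 j hj).1 h
        · exact (hi.1 j hj).2 h)]
      rw [ih ts.length (by simp) ts rfl hins']
    | raw c =>
      have hm0 : pvMatch (a :: k') (PvSeg.raw c :: ts) = true ↔ (a :: k') <+: pvFlat (PvSeg.raw c :: ts) := by
        exact pvMatch_flat (a :: k') (PvSeg.raw c :: ts)
          (fun p hp m hm => (hins p hp).2 m hm) (a :: k') ⟨0, rfl⟩
      by_cases hm : pvMatch (a :: k') (PvSeg.raw c :: ts)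
      · rw [pvRep_raw_pos a c k' v ts hm, pvFlat]
        have hts := pvMatch_take_drop (a :: k') (PvSeg.raw c :: ts) hm
        have hts' : ts = pvRawify k' ++ List.drop k'.length ts := by
          rw [show List.drop (a :: k').length (PvSeg.raw c :: ts) = List.drop k'.length ts by simp] at hts
          rw [show pvRawify (a :: k') = PvSeg.raw a :: pvRawify k' by simp [pvRawify]] at hts
          exact (List.cons.injEq .. ▸ hts).2
        conv_rhs => rw [pvFlat, pvRepC]
        have hpre : (a :: k').isPrefixOf (c :: pvFlat ts) := by
          rw [List.isPrefixOf_iff_prefix]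
          rw [← show pvFlat (PvSeg.raw c :: ts) = c :: pvFlat ts from rfl]
          exact hm0.mp hm
        simp only [hpre, if_true]
        congr 1
        have hflat : pvFlat ts = k' ++ pvFlat (List.drop k'.length ts) := by
          conv_lhs => rw [hts']
          exact pvFlat_rawify_append k' _
        rw [hflat, List.drop_append_of_le_length le_rfl, List.drop_length, List.nil_append]
        exact ih (List.drop k'.length ts).length
          (by simp only [List.length_drop, List.length_cons]; omega)
          (List.drop k'.length ts) rfl
          (fun p hp => hins' p (pvProts_drop k'.length ts p hp))
      · rw [pvRep_raw_neg a c k' v ts (by simpa using hm), pvFlat, pvFlat]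
        conv_rhs => rw [pvRepC]
        have hpre : ¬ (a :: k').isPrefixOf (c :: pvFlat ts) := by
          rw [List.isPrefixOf_iff_prefix]
          intro hp
          exact hm (hm0.mpr hp)
        simp only [hpre, Bool.false_eq_true, if_false]
        rw [ih ts.length (by simp) ts rfl hins']

def pvChain : List (String × String) → List Char → List Char × List (String × String)
  | [], r => (r, [])
  | kv :: tbl, r =>
    if PySem.Chars.isIn kv.1.toList r then
      let p := pvChain tbl (PySem.Chars.replace r kv.1.toList kv.2.toList)
      (p.1, kv :: p.2)
    else pvChain tbl r

def pvTblC (tbl : List (String × String)) : List (List Char × List Char) :=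
  tbl.map (fun kv => (kv.1.toList, kv.2.toList))

theorem pvChain_bridge :
    ∀ (tbl : List (String × String)) (r : String) (acc : List (String × String)),
      tbl.foldl
        (fun st kv =>
          if PySem.Str.isIn kv.1 st.1 then (PySem.Str.replace st.1 kv.1 kv.2, st.2 ++ [kv]) else st)
        (r, acc)
      = (String.ofList (pvChain tbl r.toList).1, acc ++ (pvChain tbl r.toList).2) := by
  intro tbl
  induction tbl with
  | nil => intro r acc; simp [pvChain, String.ofList_toList]
  | cons kv tbl ih =>
    intro r acc
    rw [List.foldl_cons, pvChain]
    have hin : PySem.Str.isIn kv.1 r = PySem.Chars.isIn kv.1.toList r.toList := by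
      simp [PySem.Str.isIn]
    by_cases hc : PySem.Chars.isIn kv.1.toList r.toList
    · simp only [hin, hc, if_true]
      rw [ih (PySem.Str.replace r kv.1 kv.2) (acc ++ [kv])]
      have hrep : (PySem.Str.replace r kv.1 kv.2).toList
          = PySem.Chars.replace r.toList kv.1.toList kv.2.toList := by
        simp [PySem.Str.toList_replace]
      rw [hrep]
      simp
    · simp only [hin, hc, Bool.false_eq_true, if_false]
      rw [ih r acc]

theorem pvProts_rawify (l : List Char) : pvProts (pvRawify l) = [] := by
  induction l with
  | nil => rfl
  | cons c t ih => simpa [pvRawify, pvProts] using ih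

theorem pvSegIn_rawify (k : List Char) (hk : k ≠ []) (l : List Char) :
    pvSegIn k (pvRawify l) = PySem.Chars.isIn k l := by
  have h := pv_segIn_flat k hk (pvRawify l) (by rw [pvProts_rawify]; intro p hp; simp at hp)
  rw [pvFlat_rawify] at h
  cases hl : PySem.Chars.isIn k l
  · cases hs : pvSegIn k (pvRawify l)
    · rfl
    · rw [← h] at hs
      rw [PySem.Chars.isIn_eq_false_iff] at hl
      exact absurd hs hl
  · rw [PySem.Chars.isIn_iff_infix] at hl
    exact h.mp hl

theorem pv_mem_keys (kv : String × String) (h : kv ∈ pvTable) : kv.1.toList ∈ pvKeys := by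
  rw [pvKeys]
  exact List.mem_map.mpr ⟨(kv.1.toList, kv.2.toList), List.mem_map_of_mem h, rfl⟩

theorem pv_mem_vals (kv : String × String) (h : kv ∈ pvTable) : kv.2.toList ∈ pvVals := by
  rw [pvVals]
  exact List.mem_map.mpr ⟨(kv.1.toList, kv.2.toList), List.mem_map_of_mem h, rfl⟩

theorem pv_key_ne_nil (kv : String × String) (h : kv ∈ pvTable) : kv.1.toList ≠ [] := by
  exact pvF1 (kv.1.toList, kv.2.toList) (List.mem_map_of_mem h)

theorem pvChain_eq :
    ∀ (tbl : List (String × String)), tbl <:+ pvTable →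
    ∀ ts, (∀ p ∈ pvProts ts, p ∈ pvVals) →
      (pvChain tbl (pvFlat ts)).1 = pvFlat (pvFoldRep (pvTblC tbl) ts) ∧
      (pvChain tbl (pvFlat ts)).2 = tbl.filter (fun kv => pvSegIn kv.1.toList ts) := by
  intro tbl
  induction tbl with
  | nil =>
    intro _ ts _
    constructor
    · rw [pvChain]; rfl
    · rw [pvChain]; rfl
  | cons kv tbl ih =>
    intro hsuf ts hprots
    have hmem : kv ∈ pvTable := hsuf.sublist.subset (by simp)
    have hsuf' : tbl <:+ pvTable := (List.suffix_cons kv tbl).trans hsuf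
    have hk := pv_mem_keys kv hmem
    have hkne := pv_key_ne_nil kv hmem
    obtain ⟨a0, k0, hk0⟩ : ∃ a0 k0, kv.1.toList = a0 :: k0 := by
      cases hc : kv.1.toList with
      | nil => exact absurd hc hkne
      | cons a0 k0 => exact ⟨a0, k0, rfl⟩
    -- the per-step membership test equals the segment-level one
    have hcond : PySem.Chars.isIn kv.1.toList (pvFlat ts) = pvSegIn kv.1.toList ts := by
      have h := pv_segIn_flat kv.1.toList hkne ts
        (fun p hp => pvF3 kv.1.toList hk p (hprots p hp))
      cases hl : PySem.Chars.isIn kv.1.toList (pvFlat ts)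
      · cases hs : pvSegIn kv.1.toList ts
        · rfl
        · rw [← h] at hs
          rw [PySem.Chars.isIn_eq_false_iff] at hl
          exact absurd hs hl
      · rw [PySem.Chars.isIn_iff_infix] at hl
        exact (h.mp hl).symm
    -- keys of tbl differ from kv.1 (table keys are nodup)
    have hnodup : ∀ kv' ∈ tbl, kv'.1.toList ≠ kv.1.toList := by
      have hsub : ((kv :: tbl).map (fun kv => kv.1.toList)).Sublist
          (pvTable.map (fun kv => kv.1.toList)) := hsuf.sublist.map _
      have hkeys : pvTable.map (fun kv => kv.1.toList) = pvKeys := by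
        rw [pvKeys, pvTableC, List.map_map]
        rfl
      have hnd : ((kv :: tbl).map (fun kv => kv.1.toList)).Nodup := by
        rw [hkeys] at hsub
        exact pvFnodup.sublist hsub
      rw [List.map_cons, List.nodup_cons] at hnd
      intro kv' hkv' heq
      exact hnd.1 (heq ▸ List.mem_map_of_mem hkv')
    rw [pvChain]
    rw [hcond]
    have hfold : pvFoldRep (pvTblC (kv :: tbl)) ts
        = pvFoldRep (pvTblC tbl) (pvStep ts (kv.1.toList, kv.2.toList)) := by
      rw [pvTblC, List.map_cons]
      rfl
    by_cases hc : pvSegIn kv.1.toList ts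
    · simp only [hc, if_true]
      -- step: A replaces, segments get one more protected chunk
      have hts' : ∀ p ∈ pvProts (pvRep a0 k0 kv.2.toList ts), p ∈ pvVals := by
        intro p hp
        rcases pvProts_pvRep a0 k0 kv.2.toList ts p hp with rfl | hp'
        · exact pv_mem_vals kv hmem
        · exact hprots p hp'
      have hrep : PySem.Chars.replace (pvFlat ts) kv.1.toList kv.2.toList
          = pvFlat (pvRep a0 k0 kv.2.toList ts) := by
        rw [hk0, pv_replace_eq]
        rw [pvFlat_pvRep a0 k0 kv.2.toList ts
          (fun p hp => hk0 ▸ pvF3 kv.1.toList hk p (hprots p hp))]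
      have hstep : pvStep ts (kv.1.toList, kv.2.toList) = pvRep a0 k0 kv.2.toList ts := by
        rw [pvStep]
        simp only [hk0]
      obtain ⟨ih1, ih2⟩ := ih hsuf' (pvRep a0 k0 kv.2.toList ts) hts'
      constructor
      · simp only [hrep]
        rw [ih1, hfold, hstep]
      · simp only [hrep]
        rw [ih2]
        rw [List.filter_cons]
        simp only [hc, if_true]
        congr 1
        apply List.filter_congr
        intro kv' hkv'
        have hkv'mem : kv' ∈ pvTable := hsuf'.sublist.subset hkv'
        have hkv'ne := pv_key_ne_nil kv' hkv'mem
        have h12 : PvAvoid (a0 :: k0) kv'.1.toList := by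
          rw [← hk0]
          exact pvF2 kv.1.toList hk kv'.1.toList (pv_mem_keys kv' hkv'mem)
            (fun heq => hnodup kv' hkv' heq.symm)
        have h21 : PvAvoid kv'.1.toList (a0 :: k0) := by
          rw [← hk0]
          exact pvF2 kv'.1.toList (pv_mem_keys kv' hkv'mem) kv.1.toList hk
            (hnodup kv' hkv')
        exact pvSegIn_pvRep_eq a0 k0 kv.2.toList kv'.1.toList hkv'ne h12 h21 ts
    · simp only [hc, Bool.false_eq_true, if_false]
      have hnoop : pvStep ts (kv.1.toList, kv.2.toList) = ts := by
        rw [pvStep]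
        simp only [hk0]
        exact pvRep_noop_seg a0 k0 kv.2.toList ts (by rw [← hk0]; simpa using hc)
      obtain ⟨ih1, ih2⟩ := ih hsuf' ts hprots
      constructor
      · rw [ih1, hfold, hnoop]
      · rw [ih2, List.filter_cons]
        simp [hc]

-- ===== VERDICT (by name: the statement is the Claim_ definition above) =====
theorem desanitize_spec : Claim_equal_desanitize := by
  intro s _
  unfold Spec_desanitize
  rw [desanitize, desanitize_alt]
  rw [pvChain_bridge pvTable s []]
  have hraw : s.toList = pvFlat (pvRawify s.toList) := (pvFlat_rawify s.toList).symm
  obtain ⟨h1, h2⟩ := pvChain_eq pvTable (List.suffix_refl pvTable) (pvRawify s.toList)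
    (by rw [pvProts_rawify]; intro p hp; simp at hp)
  rw [← hraw] at h1 h2
  rw [h1, h2]
  congr 1
  · -- result component
    rw [show pvTblC pvTable = pvTableC from rfl]
    rw [pvFoldRep_eq_pvMulti, ← pvScan_eq_multi]
  · -- applied component
    rw [List.nil_append]
    apply List.filter_congr
    intro kv hkv
    rw [pvSegIn_rawify kv.1.toList (pv_key_ne_nil kv hkv) s.toList]
    simp [PySem.Str.isIn]
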